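-- pv_equiv track=rewrite | github.com/Arthur-Ataide/Inico | Meus codigos/TP_MD.py | f_mor
-- ===== SOURCE A (Python) =====
-- def f_or(simpolo1, simpolo2, simpolo_sim_n, sim_n, sim_m, num):
--     s0 = []
--     if simpolo1 != simpolo2:
--         for c in range(num):
--             if sim_n[c] == '0' and sim_m[c] == '0':
--                 s0.append('0')
--
--             else:
--                 s0.append('1')
--
--     else:
--         if simpolo1 == simpolo_sim_n:
--             for c in range(num):
--                 if sim_n[c] == '1':
--                     s0.append('1')
--
--                 else:
--                     s0.append('0')
--
--         else:
--             for c in range(num):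
--                 if sim_m[c] == '1':
--                     s0.append('1')
--                 else:
--                     s0.append('0')
--     return s0
--
-- def f_mor(simpolo1, simpolo2, simpolo_sim_n, sim_n, sim_m, num):
--     sim_n_novo = []
--     sim_m_novo = []
--     if simpolo1 == simpolo_sim_n:
--         for c in range(num):
--             if sim_n[c] == '1':
--                 sim_n_novo.append('0')
--
--             else:
--                 sim_n_novo.append('1')
--             sim_m_novo.append(sim_m[c])
--
--     else:
--         for c in range(num):
--             if sim_m[c] == '1':
--                 sim_m_novo.append('0')
--
--             else:
--                 sim_m_novo.append('1')
--             sim_n_novo.append(sim_n[c])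
--
--     return f_or(simpolo1, simpolo2, simpolo_sim_n, sim_n_novo, sim_m_novo, num)
-- ===== SOURCE B (Python) =====
-- def f_mor(simpolo1, simpolo2, simpolo_sim_n, sim_n, sim_m, num):
--     # One pass: decide the negation side and the combine rule once, then emit each bit directly.
--     neg_n = simpolo1 == simpolo_sim_n
--     same = simpolo1 == simpolo2
--
--     def bit(c):
--         a = sim_n[c]
--         b = sim_m[c]
--         if neg_n:
--             a = '1' if a != '1' else '0'
--         else:
--             b = '1' if b != '1' else '0'
--         if same:
--             return a if neg_n else b
--         return '0' if a == '0' and b == '0' else '1'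
--
--     return [bit(c) for c in range(num)]
-- ===== Notes on version B (the rewrite author's own statement) =====
-- stated objective: simpler
-- what changed: B decides the negate-which-array and same-symbol flags once and emits each output bit in a single pass over range(num), instead of materialising the two intermediate lists sim_n_novo/sim_m_novo and running a second loop in f_or.
import Mathlib
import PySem

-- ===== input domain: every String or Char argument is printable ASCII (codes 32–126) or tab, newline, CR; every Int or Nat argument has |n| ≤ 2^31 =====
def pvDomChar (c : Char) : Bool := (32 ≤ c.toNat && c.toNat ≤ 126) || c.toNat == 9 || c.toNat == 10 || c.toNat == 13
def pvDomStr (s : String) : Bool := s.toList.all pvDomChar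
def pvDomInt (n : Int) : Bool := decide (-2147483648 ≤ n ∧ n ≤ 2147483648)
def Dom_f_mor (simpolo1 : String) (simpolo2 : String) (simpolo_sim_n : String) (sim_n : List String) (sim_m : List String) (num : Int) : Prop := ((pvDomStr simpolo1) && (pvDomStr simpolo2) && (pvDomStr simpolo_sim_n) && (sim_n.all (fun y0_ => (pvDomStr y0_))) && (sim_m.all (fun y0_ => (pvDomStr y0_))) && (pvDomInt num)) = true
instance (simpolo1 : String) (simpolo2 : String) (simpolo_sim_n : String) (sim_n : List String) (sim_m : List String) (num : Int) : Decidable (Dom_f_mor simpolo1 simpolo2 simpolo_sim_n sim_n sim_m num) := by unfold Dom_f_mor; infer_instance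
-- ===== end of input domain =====

-- B decides the negation side and the combine rule once and emits each output bit in a single pass,
-- instead of building the two intermediate negated arrays and calling f_or (objective: simpler).


-- ===== PORT A =====
def f_or (simpolo1 : String) (simpolo2 : String) (simpolo_sim_n : String) (sim_n : List String) (sim_m : List String) (num : Int) : List String :=
  if simpolo1 ≠ simpolo2 then
    (PySem.List.pyRange 0 num 1).foldl (fun s0 c =>
      if PySem.List.pyGetD sim_n c "" = "0" ∧ PySem.List.pyGetD sim_m c "" = "0"
      then s0 ++ ["0"] else s0 ++ ["1"]) []
  else if simpolo1 = simpolo_sim_n then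
    (PySem.List.pyRange 0 num 1).foldl (fun s0 c =>
      if PySem.List.pyGetD sim_n c "" = "1" then s0 ++ ["1"] else s0 ++ ["0"]) []
  else
    (PySem.List.pyRange 0 num 1).foldl (fun s0 c =>
      if PySem.List.pyGetD sim_m c "" = "1" then s0 ++ ["1"] else s0 ++ ["0"]) []

def f_mor (simpolo1 : String) (simpolo2 : String) (simpolo_sim_n : String) (sim_n : List String) (sim_m : List String) (num : Int) : List String :=
  let p :=
    if simpolo1 = simpolo_sim_n then
      (PySem.List.pyRange 0 num 1).foldl (fun p c =>
        ((if PySem.List.pyGetD sim_n c "" = "1" then p.1 ++ ["0"] else p.1 ++ ["1"]),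
         p.2 ++ [PySem.List.pyGetD sim_m c ""])) ([], [])
    else
      (PySem.List.pyRange 0 num 1).foldl (fun p c =>
        (p.1 ++ [PySem.List.pyGetD sim_n c ""],
         (if PySem.List.pyGetD sim_m c "" = "1" then p.2 ++ ["0"] else p.2 ++ ["1"]))) ([], [])
  f_or simpolo1 simpolo2 simpolo_sim_n p.1 p.2 num

-- ===== PORT B =====
def f_mor_alt (simpolo1 : String) (simpolo2 : String) (simpolo_sim_n : String) (sim_n : List String) (sim_m : List String) (num : Int) : List String :=
  let negN := simpolo1 = simpolo_sim_n
  let same := simpolo1 = simpolo2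
  (PySem.List.pyRange 0 num 1).map (fun c =>
    let a0 := PySem.List.pyGetD sim_n c ""
    let b0 := PySem.List.pyGetD sim_m c ""
    let a := if negN then (if a0 ≠ "1" then "1" else "0") else a0
    let b := if negN then b0 else (if b0 ≠ "1" then "1" else "0")
    if same then (if negN then a else b)
    else if a = "0" ∧ b = "0" then "0" else "1")

-- ===== PRECONDITION & SPEC =====
-- Pre_ excludes exactly the inputs where Python A raises IndexError: a positive num exceeding
-- the length of sim_n or sim_m.
def Pre_f_mor (simpolo1 : String) (simpolo2 : String) (simpolo_sim_n : String) (sim_n : List String) (sim_m : List String) (num : Int) : Prop :=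
  num ≤ 0 ∨ (num ≤ (sim_n.length : Int) ∧ num ≤ (sim_m.length : Int))
instance (simpolo1 : String) (simpolo2 : String) (simpolo_sim_n : String) (sim_n : List String) (sim_m : List String) (num : Int) : Decidable (Pre_f_mor simpolo1 simpolo2 simpolo_sim_n sim_n sim_m num) := by unfold Pre_f_mor; infer_instance

def pvWitness_f_mor : String × String × String × List String × List String × Int :=
  ("p", "q", "p", ["1", "0"], ["0", "0"], 2)

def Spec_f_mor (simpolo1 : String) (simpolo2 : String) (simpolo_sim_n : String) (sim_n : List String) (sim_m : List String) (num : Int) (out : List String) : Prop := out = f_mor_alt simpolo1 simpolo2 simpolo_sim_n sim_n sim_m num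
instance (simpolo1 : String) (simpolo2 : String) (simpolo_sim_n : String) (sim_n : List String) (sim_m : List String) (num : Int) (out : List String) : Decidable (Spec_f_mor simpolo1 simpolo2 simpolo_sim_n sim_n sim_m num out) := by unfold Spec_f_mor; infer_instance

-- ===== CLAIM (what is proved, stated in full; the proofs are below) =====
def Claim_equal_f_mor : Prop := ∀ (simpolo1 : String) (simpolo2 : String) (simpolo_sim_n : String) (sim_n : List String) (sim_m : List String) (num : Int), Dom_f_mor simpolo1 simpolo2 simpolo_sim_n sim_n sim_m num → Pre_f_mor simpolo1 simpolo2 simpolo_sim_n sim_n sim_m num → Spec_f_mor simpolo1 simpolo2 simpolo_sim_n sim_n sim_m num (f_mor simpolo1 simpolo2 simpolo_sim_n sim_n sim_m num)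

-- ===== LEMMAS AND PROOFS =====

-- A loop 'if p c then s ++ [u] else s ++ [v]' appends one element per step.
theorem foldl_ite_append {p : Int → Prop} [DecidablePred p] (u v : String) (l : List Int) (acc : List String) :
    l.foldl (fun s c => if p c then s ++ [u] else s ++ [v]) acc
      = acc ++ l.map (fun c => if p c then u else v) := by
  have h : (fun (s : List String) (c : Int) => if p c then s ++ [u] else s ++ [v])
      = fun s c => s ++ [if p c then u else v] := by
    funext s c; split <;> rfl
  rw [h, PySem.List.foldl_append_singleton_eq_map]

-- ===== VERDICT (by name: the statement is the Claim_ definition above) =====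
theorem f_mor_spec : Claim_equal_f_mor := by
  unfold Claim_equal_f_mor
  intro s1 s2 ssn sn sm num _ _
  unfold Spec_f_mor f_mor f_mor_alt f_or
  by_cases h1 : s1 = ssn <;> by_cases h2 : s1 = s2
  · -- negate sim_n; symbols equal: f_or returns the negated sim_n bits
    simp only [if_neg (not_not_intro h2), if_pos h1, if_pos h2]
    rw [PySem.List.foldl_prod_mk
          (fun (l : List String) c => if PySem.List.pyGetD sn c "" = "1" then l ++ ["0"] else l ++ ["1"])
          (fun (l : List String) c => l ++ [PySem.List.pyGetD sm c ""])
          (PySem.List.pyRange 0 num 1) [] []]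
    dsimp only
    rw [foldl_ite_append (p := fun c => PySem.List.pyGetD sn c "" = "1") "0" "1"]
    simp only [List.nil_append]
    refine Eq.trans (PySem.List.foldl_congr_mem' (PySem.List.pyRange 0 num 1) _
      (fun s c => if ((if PySem.List.pyGetD sn c "" = "1" then "0" else "1") : String) = "1"
                  then s ++ ["1"] else s ++ ["0"]) [] ?_) ?_
    · intro c hc s
      rcases (PySem.List.mem_pyRange_one).1 hc with ⟨h0, hn⟩
      dsimp only
      simp only [PySem.List.pyGetD_map_pyRange_of_nonneg
            (fun c => if PySem.List.pyGetD sn c "" = "1" then "0" else "1") num c "" h0 hn]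
    · rw [foldl_ite_append
            (p := fun c => ((if PySem.List.pyGetD sn c "" = "1" then "0" else "1") : String) = "1") "1" "0"]
      simp only [List.nil_append]
      refine List.map_congr_left ?_
      intro c _
      by_cases hx : PySem.List.pyGetD sn c "" = "1" <;> simp [hx]
  · -- negate sim_n; symbols differ: f_or ORs negated sim_n with sim_m
    simp only [if_pos h2, if_neg h2, if_pos h1]
    rw [PySem.List.foldl_prod_mk
          (fun (l : List String) c => if PySem.List.pyGetD sn c "" = "1" then l ++ ["0"] else l ++ ["1"])
          (fun (l : List String) c => l ++ [PySem.List.pyGetD sm c ""])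
          (PySem.List.pyRange 0 num 1) [] []]
    dsimp only
    rw [foldl_ite_append (p := fun c => PySem.List.pyGetD sn c "" = "1") "0" "1",
        PySem.List.foldl_append_singleton_eq_map (fun c => PySem.List.pyGetD sm c "")]
    simp only [List.nil_append]
    refine Eq.trans (PySem.List.foldl_congr_mem' (PySem.List.pyRange 0 num 1) _
      (fun s c => if ((if PySem.List.pyGetD sn c "" = "1" then "0" else "1") : String) = "0"
                     ∧ PySem.List.pyGetD sm c "" = "0"
                  then s ++ ["0"] else s ++ ["1"]) [] ?_) ?_
    · intro c hc s
      rcases (PySem.List.mem_pyRange_one).1 hc with ⟨h0, hn⟩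
      dsimp only
      simp only [PySem.List.pyGetD_map_pyRange_of_nonneg
            (fun c => if PySem.List.pyGetD sn c "" = "1" then "0" else "1") num c "" h0 hn,
          PySem.List.pyGetD_map_pyRange_of_nonneg
            (fun c => PySem.List.pyGetD sm c "") num c "" h0 hn]
    · rw [foldl_ite_append
            (p := fun c => ((if PySem.List.pyGetD sn c "" = "1" then "0" else "1") : String) = "0"
                     ∧ PySem.List.pyGetD sm c "" = "0") "0" "1"]
      simp only [List.nil_append]
      refine List.map_congr_left ?_
      intro c _
      by_cases hx : PySem.List.pyGetD sn c "" = "1" <;> simp [hx]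
  · -- negate sim_m; symbols equal: f_or returns the negated sim_m bits
    simp only [if_neg (not_not_intro h2), if_neg h1, if_pos h2]
    rw [PySem.List.foldl_prod_mk
          (fun (l : List String) c => l ++ [PySem.List.pyGetD sn c ""])
          (fun (l : List String) c => if PySem.List.pyGetD sm c "" = "1" then l ++ ["0"] else l ++ ["1"])
          (PySem.List.pyRange 0 num 1) [] []]
    dsimp only
    rw [foldl_ite_append (p := fun c => PySem.List.pyGetD sm c "" = "1") "0" "1"]
    simp only [List.nil_append]
    refine Eq.trans (PySem.List.foldl_congr_mem' (PySem.List.pyRange 0 num 1) _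
      (fun s c => if ((if PySem.List.pyGetD sm c "" = "1" then "0" else "1") : String) = "1"
                  then s ++ ["1"] else s ++ ["0"]) [] ?_) ?_
    · intro c hc s
      rcases (PySem.List.mem_pyRange_one).1 hc with ⟨h0, hn⟩
      dsimp only
      simp only [PySem.List.pyGetD_map_pyRange_of_nonneg
            (fun c => if PySem.List.pyGetD sm c "" = "1" then "0" else "1") num c "" h0 hn]
    · rw [foldl_ite_append
            (p := fun c => ((if PySem.List.pyGetD sm c "" = "1" then "0" else "1") : String) = "1") "1" "0"]
      simp only [List.nil_append]
      refine List.map_congr_left ?_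
      intro c _
      by_cases hx : PySem.List.pyGetD sm c "" = "1" <;> simp [hx]
  · -- negate sim_m; symbols differ: f_or ORs sim_n with negated sim_m
    simp only [if_pos h2, if_neg h2, if_neg h1]
    rw [PySem.List.foldl_prod_mk
          (fun (l : List String) c => l ++ [PySem.List.pyGetD sn c ""])
          (fun (l : List String) c => if PySem.List.pyGetD sm c "" = "1" then l ++ ["0"] else l ++ ["1"])
          (PySem.List.pyRange 0 num 1) [] []]
    dsimp only
    rw [foldl_ite_append (p := fun c => PySem.List.pyGetD sm c "" = "1") "0" "1",
        PySem.List.foldl_append_singleton_eq_map (fun c => PySem.List.pyGetD sn c "")]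
    simp only [List.nil_append]
    refine Eq.trans (PySem.List.foldl_congr_mem' (PySem.List.pyRange 0 num 1) _
      (fun s c => if PySem.List.pyGetD sn c "" = "0"
                     ∧ ((if PySem.List.pyGetD sm c "" = "1" then "0" else "1") : String) = "0"
                  then s ++ ["0"] else s ++ ["1"]) [] ?_) ?_
    · intro c hc s
      rcases (PySem.List.mem_pyRange_one).1 hc with ⟨h0, hn⟩
      dsimp only
      simp only [PySem.List.pyGetD_map_pyRange_of_nonneg
            (fun c => PySem.List.pyGetD sn c "") num c "" h0 hn,
          PySem.List.pyGetD_map_pyRange_of_nonneg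
            (fun c => if PySem.List.pyGetD sm c "" = "1" then "0" else "1") num c "" h0 hn]
    · rw [foldl_ite_append
            (p := fun c => PySem.List.pyGetD sn c "" = "0"
                     ∧ ((if PySem.List.pyGetD sm c "" = "1" then "0" else "1") : String) = "0") "0" "1"]
      simp only [List.nil_append]
      refine List.map_congr_left ?_
      intro c _
      by_cases hx : PySem.List.pyGetD sm c "" = "1" <;> simp [hx]
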